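-- pv_equiv track=rewrite | github.com/morvael/lotr-lcg-set-generator | lotr.py | _c2n
-- ===== SOURCE A (Python) =====
-- def _c2n(column):
--     """ Convert column to number.
--     """
--     res = 0
--     multiplier = 1
--     column = column.upper()
--     for symbol in column[::-1]:
--         res += (ord(symbol) - 64) * multiplier
--         multiplier *= 26
--
--     return res
-- ===== SOURCE B (Python) =====
-- def _c2n(column):
--     """ Convert column to number.
--     """
--     res = 0
--     for symbol in column.upper():
--         res = res * 26 + (ord(symbol) - 64)
--     return res
-- ===== Notes on version B (the rewrite author's own statement) =====
-- stated objective: idiomatic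
-- what changed: Replaced the reversed iteration with an explicit positional multiplier by a single forward Horner-style accumulation res = res*26 + digit, removing the multiplier variable, the string reversal, and the ever-growing multiplier big-int.
import Mathlib
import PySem

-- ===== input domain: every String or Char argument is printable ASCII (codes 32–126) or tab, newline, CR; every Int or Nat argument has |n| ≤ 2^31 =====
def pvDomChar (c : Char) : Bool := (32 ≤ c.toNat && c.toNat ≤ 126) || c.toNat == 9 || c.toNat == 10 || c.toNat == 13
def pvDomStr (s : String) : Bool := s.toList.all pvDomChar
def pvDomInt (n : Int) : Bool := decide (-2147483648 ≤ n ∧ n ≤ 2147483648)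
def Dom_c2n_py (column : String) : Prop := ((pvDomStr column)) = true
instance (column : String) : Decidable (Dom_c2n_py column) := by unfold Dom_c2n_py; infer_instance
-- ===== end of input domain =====

-- B replaces the reversed loop with positional multiplier by a single forward Horner accumulation (idiomatic; same cost).


-- ===== PORT A =====
-- for symbol in column[::-1]: res += (ord(symbol)-64)*multiplier; multiplier *= 26
def c2n_py (column : String) : Int :=
  let col := PySem.Str.upper column
  let st := col.toList.reverse.foldl
    (fun (st : Int × Int) symbol => (st.1 + ((symbol.toNat : Int) - 64) * st.2, st.2 * 26))
    (0, 1)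
  st.1

-- ===== PORT B =====
-- for symbol in column.upper(): res = res*26 + (ord(symbol)-64)
def c2n_py_alt (column : String) : Int :=
  (PySem.Str.upper column).toList.foldl
    (fun res symbol => res * 26 + ((symbol.toNat : Int) - 64)) 0

-- ===== PRECONDITION & SPEC =====
def Spec_c2n_py (column : String) (out : Int) : Prop := out = c2n_py_alt column
instance (column : String) (out : Int) : Decidable (Spec_c2n_py column out) := by unfold Spec_c2n_py; infer_instance

-- ===== CLAIM (what is proved, stated in full; the proofs are below) =====
def Claim_equal_c2n_py : Prop := ∀ (column : String), Dom_c2n_py column → Spec_c2n_py column (c2n_py column)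

-- ===== LEMMAS AND PROOFS =====

-- value of a char list read least-significant digit first
def pvQ : List Char → Int
  | [] => 0
  | c :: t => ((c.toNat : Int) - 64) + 26 * pvQ t

-- A's loop: the pair fold over the reversed list computes pvQ of that list
theorem pvA_loop (l : List Char) (r m : Int) :
    (l.foldl (fun (st : Int × Int) symbol =>
        (st.1 + ((symbol.toNat : Int) - 64) * st.2, st.2 * 26)) (r, m)).1
      = r + m * pvQ l := by
  induction l generalizing r m with
  | nil => simp [pvQ]
  | cons c t ih => simp [List.foldl, pvQ, ih]; ring

-- B's loop: the Horner fold computes pvQ of the reversed list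
theorem pvB_loop (l : List Char) :
    l.foldl (fun res symbol => res * 26 + ((symbol.toNat : Int) - 64)) 0
      = pvQ l.reverse := by
  induction l using List.reverseRecOn with
  | nil => simp [pvQ]
  | append_singleton t c ih => simp [List.foldl_append, ih, pvQ]; ring

-- ===== VERDICT (by name: the statement is the Claim_ definition above) =====
theorem c2n_py_spec : Claim_equal_c2n_py := by
  intro column _
  unfold Spec_c2n_py c2n_py c2n_py_alt
  rw [pvA_loop, pvB_loop]
  ring
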